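-- pv_equiv track=rewrite | github.com/Thanhtinh06/baitapbigo | Bai5_Array/next_round.py | is_contestant_next_round
-- ===== SOURCE A (Python) =====
-- def is_contestant_next_round(n, k, a):
--     count = k
--     value_min = a[k-1]
--     if value_min != 0:
--         for i in range(k, n):
--             if a[i] >= value_min:
--                 count += 1
--         return count
--     else:
--         count = a.index(0)
--
--     return count
-- ===== SOURCE B (Python) =====
-- def is_contestant_next_round(n, k, a):
--     v = a[k - 1]
--     if v == 0:
--         i = 0
--         while a[i] != 0:
--             i += 1
--         return i
--     s = sorted(a[k:n], reverse=True)
--     adv = 0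
--     while adv < len(s) and s[adv] >= v:
--         adv += 1
--     return k + adv
-- ===== Notes on version B (the rewrite author's own statement) =====
-- stated objective: alternative
-- what changed: B replaces A's index loop that counts entries of a[k:n] >= a[k-1] by sorting that slice descending and scanning its qualifying prefix, and replaces a.index(0) by a direct first-zero scan.
-- outside the precondition, e.g. on is_contestant_next_round(2, -1, [3, 1]): A returns 0, B returns -1; on is_contestant_next_round(-1, 1, [3, 5, 2]): A returns 1, B returns 2
import Mathlib
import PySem

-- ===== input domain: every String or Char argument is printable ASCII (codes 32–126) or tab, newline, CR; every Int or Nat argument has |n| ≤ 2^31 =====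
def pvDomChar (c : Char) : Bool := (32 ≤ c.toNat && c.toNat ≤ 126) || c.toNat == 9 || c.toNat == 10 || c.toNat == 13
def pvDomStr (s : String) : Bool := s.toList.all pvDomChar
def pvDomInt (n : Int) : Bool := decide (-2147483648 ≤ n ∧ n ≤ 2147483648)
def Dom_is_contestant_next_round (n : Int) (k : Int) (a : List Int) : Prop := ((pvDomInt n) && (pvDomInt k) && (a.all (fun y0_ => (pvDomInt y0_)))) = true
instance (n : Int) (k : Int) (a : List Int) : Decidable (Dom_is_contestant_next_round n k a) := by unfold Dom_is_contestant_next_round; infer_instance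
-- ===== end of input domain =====

-- B re-implements the count by sorting the slice a[k:n] descending and scanning its qualifying
-- prefix (and finds the first zero by a direct scan) — an alternative algorithm, not claimed faster.

-- ===== PORT A =====
def is_contestant_next_round (n : Int) (k : Int) (a : List Int) : Int :=
  let count : Int := k
  let value_min : Int := PySem.List.pyGetD a (k - 1) 0  -- a[k-1]; IndexError excluded by Pre_
  if value_min ≠ 0 then
    (PySem.List.pyRange k n 1).foldl
      (fun c i => if PySem.List.pyGetD a i 0 ≥ value_min then c + 1 else c) count
  else
    (((PySem.List.index? a 0).getD 0 : Nat) : Int)  -- a.index(0); 0 ∈ a here since a[k-1] = 0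

-- ===== PORT B =====
-- 'i = 0; while a[i] != 0: i += 1; return i' as a scan of a carrying the index
def pvFirstZero : List Int → Int → Int
  | [], i => i
  | x :: t, i => if x ≠ 0 then pvFirstZero t (i + 1) else i

-- 'adv = 0; while adv < len(s) and s[adv] >= v: adv += 1' as a scan of s carrying adv
def pvAdvance (v : Int) : List Int → Int → Int
  | [], adv => adv
  | x :: t, adv => if x ≥ v then pvAdvance v t (adv + 1) else adv

def is_contestant_next_round_alt (n : Int) (k : Int) (a : List Int) : Int :=
  let v : Int := PySem.List.pyGetD a (k - 1) 0
  if v = 0 then pvFirstZero a 0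
  else
    let s := PySem.List.sorted (PySem.List.slice a (some k) (some n)) (fun x => x) true
    k + pvAdvance v s 0

-- ===== PRECONDITION & SPEC =====
-- Pre_ requires a[k-1] to be a valid index and then one of: a[k-1] == 0, or 0 ≤ k with 0 ≤ n ≤ len(a),
-- or both the loop range and the slice empty; it excludes inputs where A raises IndexError and the
-- corners where A's value comes from negative-index wraparound of the loop indices (k < 0 with
-- a[k-1] ≠ 0) or from silently ignoring a negative n.
def Pre_is_contestant_next_round (n : Int) (k : Int) (a : List Int) : Prop :=
  PySem.Raise.InRange a.length (k - 1) ∧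
    (PySem.List.pyGet? a (k - 1) = some 0 ∨
      (0 ≤ k ∧ 0 ≤ n ∧ n ≤ (a.length : Int)) ∨
      (n ≤ k ∧ PySem.List.clampIdx a.length n ≤ PySem.List.clampIdx a.length k))
instance (n : Int) (k : Int) (a : List Int) : Decidable (Pre_is_contestant_next_round n k a) := by
  unfold Pre_is_contestant_next_round; infer_instance

def pvWitness_is_contestant_next_round : Int × Int × List Int := (3, 2, [5, 3, 1])

def Spec_is_contestant_next_round (n : Int) (k : Int) (a : List Int) (out : Int) : Prop := out = is_contestant_next_round_alt n k a
instance (n : Int) (k : Int) (a : List Int) (out : Int) : Decidable (Spec_is_contestant_next_round n k a out) := by unfold Spec_is_contestant_next_round; infer_instance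

-- ===== CLAIM (what is proved, stated in full; the proofs are below) =====
def Claim_equal_is_contestant_next_round : Prop := ∀ (n : Int) (k : Int) (a : List Int), Dom_is_contestant_next_round n k a → Pre_is_contestant_next_round n k a → Spec_is_contestant_next_round n k a (is_contestant_next_round n k a)

-- ===== LEMMAS AND PROOFS =====

-- the first-zero scan is a.index(0) when 0 ∈ a
theorem pvFirstZero_eq (l : List Int) (h : (0 : Int) ∈ l) (i : Int) :
    pvFirstZero l i = i + (((PySem.List.index? l 0).getD 0 : Nat) : Int) := by
  induction l generalizing i with
  | nil => cases h
  | cons x t ih =>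
    by_cases hx : x = 0
    · subst hx
      simp [pvFirstZero]
    · have ht : (0 : Int) ∈ t := by
        cases h with
        | head => exact absurd rfl hx
        | tail _ h' => exact h'
      obtain ⟨j, hj⟩ := Option.isSome_iff_exists.mp ((PySem.List.index?_isSome_iff t 0).mpr ht)
      rw [PySem.List.index?_cons_of_ne t hx, hj]
      simp only [pvFirstZero, if_pos hx, ih ht, hj, Option.map_some, Option.getD_some]
      push_cast
      ring

-- the prefix scan of a descending list counts its elements ≥ v
theorem pvAdvance_eq (v : Int) (s : List Int) (hs : s.Pairwise (fun a b => b ≤ a)) (i : Int) :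
    pvAdvance v s i = i + (s.countP (fun x => decide (v ≤ x)) : Int) := by
  induction s generalizing i with
  | nil => simp [pvAdvance]
  | cons x t ih =>
    rw [List.pairwise_cons] at hs
    by_cases hx : v ≤ x
    · rw [List.countP_cons]
      simp only [pvAdvance, ge_iff_le, hx, if_pos]
      rw [ih hs.2 (i + 1)]
      simp
      ring
    · have hz : t.countP (fun x => decide (v ≤ x)) = 0 := by
        rw [List.countP_eq_zero]
        intro y hy
        simp only [decide_eq_true_eq]
        intro hvy
        exact hx (le_trans hvy (hs.1 y hy))
      rw [List.countP_cons]
      simp [pvAdvance, hx, hz]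

-- ===== VERDICT (by name: the statement is the Claim_ definition above) =====
theorem is_contestant_next_round_spec : Claim_equal_is_contestant_next_round := by
  intro n k a _ hpre
  obtain ⟨hin, hcase⟩ := hpre
  unfold Spec_is_contestant_next_round is_contestant_next_round is_contestant_next_round_alt
  simp only []
  obtain ⟨w, hw⟩ : ∃ w, PySem.List.pyGet? a (k - 1) = some w := by
    cases hget : PySem.List.pyGet? a (k - 1) with
    | none => exact absurd hin ((PySem.List.pyGet?_eq_none_iff a (k - 1)).mp hget)
    | some w => exact ⟨w, rfl⟩
  set v := PySem.List.pyGetD a (k - 1) 0 with hvdef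
  have hvw : v = w := by
    show (PySem.List.pyGet? a (k - 1)).getD 0 = w
    rw [hw]; rfl
  by_cases h0 : v = 0
  · -- zero branch: a.index(0) versus the first-zero scan
    have hmem : (0 : Int) ∈ a := by
      have := PySem.List.mem_of_pyGet?_eq_some a hw
      rwa [← hvw, h0] at this
    rw [if_neg (by simp [h0]), if_pos h0, pvFirstZero_eq a hmem 0, zero_add]
  · rw [if_pos h0, if_neg h0]
    have hcase' : (0 ≤ k ∧ 0 ≤ n ∧ n ≤ (a.length : Int)) ∨
        (n ≤ k ∧ PySem.List.clampIdx a.length n ≤ PySem.List.clampIdx a.length k) := by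
      rcases hcase with h | h | h
      · have hw0 : w = 0 := by rw [h] at hw; exact (Option.some_inj.mp hw).symm
        exact absurd (hvw.trans hw0) h0
      · exact Or.inl h
      · exact Or.inr h
    rcases hcase' with ⟨hk0, hn0, hn2⟩ | ⟨hnk, hcl⟩
    · -- count the qualifying prefix of the sorted slice
      have hadv := pvAdvance_eq v
        (PySem.List.sorted (PySem.List.slice a (some k) (some n)) (fun x => x) true)
        (PySem.List.sorted_pairwise_rev (PySem.List.slice a (some k) (some n)) (fun x => x)) 0
      rw [hadv, zero_add]
      rw [List.Perm.countP_eq _ (PySem.List.sorted_perm (PySem.List.slice a (some k) (some n)) (fun x => x) true)]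
      -- turn A's loop into a count over the slice
      have htake : ∀ (acc : Int), ∀ i ∈ PySem.List.pyRange k n 1,
          (if PySem.List.pyGetD a i 0 ≥ v then acc + 1 else acc)
            = (if PySem.List.pyGetD (a.take n.toNat) i 0 ≥ v then acc + 1 else acc) := by
        intro acc i hi
        rw [PySem.List.mem_pyRange_one] at hi
        have h1 : PySem.List.pyGetD (a.take n.toNat) i 0 = PySem.List.pyGetD a i 0 := by
          rw [PySem.List.pyGetD_of_nonneg _ 0 (by omega), PySem.List.pyGetD_of_nonneg a 0 (by omega)]
          have : i.toNat < n.toNat := by omega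
          simp [List.getD, this]
        rw [h1]
      rw [PySem.List.foldl_congr_mem _ _ _ _ htake]
      have hlen : n = ((a.take n.toNat).length : Int) := by
        simp [List.length_take]
        omega
      have hfold := PySem.List.foldl_pyRange_pyGetD' (a.take n.toNat) 0
        (fun c x => if x ≥ v then c + 1 else c) k (show (0 : Int) ≤ k by omega)
      rw [← hlen] at hfold
      rw [hfold, PySem.List.foldl_ite_add_one (fun x => x ≥ v) _ k]
      rw [PySem.List.slice_toNat a (by omega) (by omega), ← List.drop_take]
    · -- both the loop range and the slice are empty: each side returns k
      have hsl : PySem.List.slice a (some k) (some n) = [] := by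
        have hl := PySem.List.length_slice a k n
        have hl0 : (PySem.List.slice a (some k) (some n)).length = 0 := by omega
        exact List.length_eq_zero_iff.mp hl0
      rw [PySem.List.pyRange_one_eq_nil hnk, hsl]
      simp [pvAdvance, (PySem.List.sorted_eq_nil_iff ([] : List Int) (fun x => x) true).mpr rfl]
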